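-- pv_equiv track=rewrite | github.com/RedHong56/backjoon_HSK | 프로그래머스/0/120921. 문자열 밀기/문자열 밀기.py | solution
-- ===== SOURCE A (Python) =====
-- def solution(A, B):
--     if A == B:
--         return 0
--
--     for i in range(1, len(A)):
--         order = A[-i:] + A[:-i]
--         if order == B:
--             return i
--
--     return -1
-- ===== SOURCE B (Python) =====
-- def solution(A, B):
--     # Locate B as a substring of A+A (rightmost occurrence after index 0)
--     # instead of generating every rotation: shift i = len(A) - position.
--     if len(A) != len(B):
--         return -1
--     if A == B:
--         return 0
--     j = (A + A).rfind(B, 1)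
--     return len(A) - j if j != -1 else -1
-- ===== Notes on version B (the rewrite author's own statement) =====
-- stated objective: faster
-- what changed: Instead of constructing every rotation A[-i:]+A[:-i] and comparing it to B, B does one rightmost substring search of B in the doubled string A+A (after an O(1) length check) and maps the match position back to the shift.
import Mathlib
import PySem

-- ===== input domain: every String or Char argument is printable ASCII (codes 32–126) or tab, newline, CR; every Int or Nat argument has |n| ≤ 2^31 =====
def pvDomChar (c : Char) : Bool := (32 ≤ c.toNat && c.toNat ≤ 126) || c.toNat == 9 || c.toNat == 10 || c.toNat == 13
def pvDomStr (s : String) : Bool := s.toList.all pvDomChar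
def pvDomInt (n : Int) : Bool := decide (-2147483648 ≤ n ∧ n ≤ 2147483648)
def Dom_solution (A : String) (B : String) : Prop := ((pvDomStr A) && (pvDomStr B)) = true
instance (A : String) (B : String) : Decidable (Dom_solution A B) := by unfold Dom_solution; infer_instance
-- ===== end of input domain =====

-- B replaces A's rotation-by-rotation comparison loop by one rightmost substring
-- search of B in the doubled string A+A (objective: faster, constant-factor).

-- ===== PORT A =====
-- the for-loop with early return: try i = 1, 2, …; first rotation equal to B wins
def solLoopA (a b : List Char) : List Int → Int
  | [] => -1
  | i :: rest =>
      -- order = A[-i:] + A[:-i]; if order == B: return i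
      if PySem.Chars.slice a (some (-i)) none ++ PySem.Chars.slice a none (some (-i)) = b then i
      else solLoopA a b rest

def solution (A : String) (B : String) : Int :=
  if A = B then 0
  else solLoopA A.toList B.toList (PySem.List.pyRange 1 (PySem.Str.len A) 1)

-- ===== PORT B =====
def solution_alt (A : String) (B : String) : Int :=
  if PySem.Str.len A ≠ PySem.Str.len B then -1
  else if A = B then 0
  else
    -- j = (A + A).rfind(B, 1)
    let j := PySem.Chars.rfindFrom (A.toList ++ A.toList) B.toList 1 none
    if j ≠ -1 then PySem.Str.len A - j else -1

-- ===== PRECONDITION & SPEC =====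
def Spec_solution (A : String) (B : String) (out : Int) : Prop := out = solution_alt A B
instance (A : String) (B : String) (out : Int) : Decidable (Spec_solution A B out) := by unfold Spec_solution; infer_instance

-- ===== CLAIM (what is proved, stated in full; the proofs are below) =====
def Claim_equal_solution : Prop := ∀ (A : String) (B : String), Dom_solution A B → Spec_solution A B (solution A B)

-- ===== LEMMAS AND PROOFS =====

-- one-step unfoldings of PySem.Chars.rfind.go (the scan inside rfind)
theorem go_zero (s sub : List Char) :
    PySem.Chars.rfind.go s sub 0 = if sub.isPrefixOf s then 0 else -1 := rfl

theorem go_succ (s sub : List Char) (j : Nat) :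
    PySem.Chars.rfind.go s sub (j+1) =
      if sub.isPrefixOf (s.drop (j+1)) then ((j:Int)+1) else PySem.Chars.rfind.go s sub j := rfl

theorem go_ne_neg_one_nonneg (s sub : List Char) (j : Nat)
    (h : PySem.Chars.rfind.go s sub j ≠ -1) : 0 ≤ PySem.Chars.rfind.go s sub j := by
  induction j with
  | zero => rw [go_zero] at *; split_ifs at * <;> simp_all
  | succ j ih => rw [go_succ] at *; split_ifs at * <;> first | positivity | exact ih h

-- A's rotated string, as drop/take  (0 < k)
theorem rot_eq (a : List Char) (k : Nat) (hk : 0 < k) :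
    PySem.Chars.slice a (some (-(k:Int))) none ++ PySem.Chars.slice a none (some (-(k:Int)))
      = a.drop (a.length - k) ++ a.take (a.length - k) := by
  rw [PySem.Chars.slice_eq_listSlice, PySem.Chars.slice_eq_listSlice,
      PySem.List.slice_from_neg_natCast a k hk, PySem.List.slice_to_neg_natCast a k hk]

-- the loop condition at shift k ↔ prefix match at position n−k of a++a
theorem cond_iff (a b : List Char) (k : Nat) (hk : 0 < k) (hkn : k < a.length)
    (hb : b.length = a.length) :
    (a.drop (a.length - k) ++ a.take (a.length - k) = b)
      ↔ b.isPrefixOf ((a ++ a).drop (a.length - k)) = true := by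
  set n := a.length with hn
  set m := n - k with hm
  have hmle : m ≤ n := by omega
  have hdrop : (a ++ a).drop m = a.drop m ++ a := List.drop_append_of_le_length hmle
  rw [List.isPrefixOf_iff_prefix, hdrop]
  constructor
  · intro h
    rw [List.prefix_iff_eq_take]
    rw [hb, List.take_append, List.take_of_length_le (by simp; omega)]
    have : n - (a.drop m).length = m := by simp; omega
    rw [this]; exact h.symm
  · intro h
    have := List.prefix_iff_eq_take.mp h
    rw [hb, List.take_append, List.take_of_length_le (by simp; omega)] at this
    have hmm : a.length - (a.drop m).length = m := by simp; omega
    rw [hmm] at this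
    exact this.symm

-- above position n−1 in (a++a).drop 1 (i.e. position ≥ n in a++a) nothing matches
theorem go_top (a b : List Char) (hb : b.length = a.length) (hn : 0 < a.length) :
    ∀ t : Nat, PySem.Chars.rfind.go ((a ++ a).drop 1) b (a.length - 1 + t)
      = PySem.Chars.rfind.go ((a ++ a).drop 1) b (a.length - 1) := by
  intro t
  induction t with
  | zero => rfl
  | succ t ih =>
    have h1 : a.length - 1 + (t + 1) = (a.length - 1 + t) + 1 := by omega
    rw [h1, go_succ]
    have hnp : ¬ (b.isPrefixOf (((a ++ a).drop 1).drop (a.length - 1 + t + 1)) = true) := by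
      rw [List.isPrefixOf_iff_prefix, List.drop_drop]
      intro hpre
      have hle := hpre.length_le
      simp only [List.length_drop, List.length_append] at hle
      omega
    rw [if_neg hnp]
    exact ih

-- position n in a++a is a itself: no match there either (a ≠ b)
theorem go_at_top (a b : List Char) (hab : a ≠ b) (hb : b.length = a.length) (hn : 2 ≤ a.length) :
    PySem.Chars.rfind.go ((a ++ a).drop 1) b (a.length - 1)
      = PySem.Chars.rfind.go ((a ++ a).drop 1) b (a.length - 2) := by
  have h1 : a.length - 1 = (a.length - 2) + 1 := by omega
  rw [h1, go_succ]
  have hd : ((a ++ a).drop 1).drop (a.length - 2 + 1) = a := by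
    rw [List.drop_drop]
    have : 1 + (a.length - 2 + 1) = a.length := by omega
    rw [this]
    simp
  have hnp : ¬ (b.isPrefixOf (((a ++ a).drop 1).drop (a.length - 2 + 1)) = true) := by
    rw [hd, List.isPrefixOf_iff_prefix]
    intro hpre
    exact hab (hpre.eq_of_length (by omega)).symm
  rw [if_neg hnp]

-- main correspondence: the upward rotation scan = the downward prefix scan
theorem main_loop (a b : List Char) (hb : b.length = a.length) (hn : 2 ≤ a.length) :
    ∀ j : Nat, j ≤ a.length - 2 →
      solLoopA a b (PySem.List.pyRange ((a.length : Int) - 1 - j) (a.length : Int)) =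
        (if PySem.Chars.rfind.go ((a ++ a).drop 1) b j = -1 then -1
         else (a.length : Int) - 1 - PySem.Chars.rfind.go ((a ++ a).drop 1) b j) := by
  intro j
  induction j with
  | zero =>
    intro _
    have h0 : ((a.length : Int) - 1 - (0:Nat)) = ((a.length - 1 : Nat) : Int) := by
      push_cast; omega
    rw [h0, PySem.List.pyRange_one_cons (by omega)]
    have h1 : ((a.length - 1 : Nat) : Int) + 1 = (a.length : Int) := by omega
    rw [h1]
    have hemp : PySem.List.pyRange ((a.length : Int)) ((a.length : Int)) = [] := by
      simp [PySem.List.pyRange]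
    rw [hemp]
    have hpos : a.length - (a.length - 1) = 1 := by omega
    have hc := cond_iff a b (a.length - 1) (by omega) (by omega) hb
    rw [hpos] at hc
    rw [go_zero]
    by_cases h : b.isPrefixOf ((a ++ a).drop 1) = true
    · rw [if_pos h]
      simp only [solLoopA, rot_eq a (a.length - 1) (by omega), hpos, if_pos (hc.mpr h)]
      push_cast; omega
    · rw [if_neg h]
      simp only [solLoopA, rot_eq a (a.length - 1) (by omega), hpos,
        if_neg (fun hq => h (hc.mp hq))]
      simp
  | succ j ih =>
    intro hj
    have hk : ((a.length : Int) - 1 - (j+1:Nat)) = ((a.length - 2 - j : Nat) : Int) := by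
      push_cast; omega
    rw [hk, PySem.List.pyRange_one_cons (by omega)]
    have h1 : ((a.length - 2 - j : Nat) : Int) + 1 = (a.length : Int) - 1 - j := by
      omega
    rw [h1]
    have hpos : a.length - (a.length - 2 - j) = j + 2 := by omega
    have hc := cond_iff a b (a.length - 2 - j) (by omega) (by omega) hb
    rw [hpos] at hc
    have hdd : ((a ++ a).drop 1).drop (j+1) = (a ++ a).drop (j+2) := by
      rw [List.drop_drop, show 1 + (j + 1) = j + 2 by omega]
    rw [go_succ, hdd]
    by_cases h : b.isPrefixOf ((a ++ a).drop (j+2)) = true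
    · rw [if_pos h]
      simp only [solLoopA, rot_eq a (a.length - 2 - j) (by omega), hpos, if_pos (hc.mpr h)]
      rw [if_neg (by omega)]
      omega
    · rw [if_neg h]
      simp only [solLoopA, rot_eq a (a.length - 2 - j) (by omega), hpos,
        if_neg (fun hq => h (hc.mp hq))]
      exact ih (by omega)

-- length mismatch: every rotation has length a.length, so the loop never fires
theorem loop_len_mismatch (a b : List Char) (hb : b.length ≠ a.length) :
    ∀ l : List Int, (∀ i ∈ l, 1 ≤ i ∧ i < (a.length : Int)) → solLoopA a b l = -1 := by
  intro l
  induction l with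
  | nil => intro _; rfl
  | cons i rest ih =>
    intro h
    obtain ⟨h1, h2⟩ := h i (by simp)
    have hk : i = ((i.toNat : Nat) : Int) := by omega
    have hc : ¬ (PySem.Chars.slice a (some (-i)) none ++ PySem.Chars.slice a none (some (-i)) = b) := by
      rw [hk, rot_eq a i.toNat (by omega)]
      intro hEq
      apply hb
      rw [← hEq]
      simp only [List.length_append, List.length_drop, List.length_take]
      omega
    simp only [solLoopA, if_neg hc]
    exact ih (fun x hx => h x (List.mem_cons_of_mem _ hx))

-- evaluation of (A+A).rfind(B, 1) down to the inner scan
theorem rfindFrom_eval (a b : List Char) (hn : 0 < a.length) :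
    PySem.Chars.rfindFrom (a ++ a) b 1 none =
      (if PySem.Chars.rfind.go ((a ++ a).drop 1) b (a.length + a.length - 1) = -1 then -1
       else 1 + PySem.Chars.rfind.go ((a ++ a).drop 1) b (a.length + a.length - 1)) := by
  simp only [PySem.Chars.rfindFrom, PySem.Chars.rfind]
  norm_num
  rw [if_neg (by simp; omega)]
  have h2 : ((a.length : Int) + ↑a.length).toNat = a.length + a.length := by omega
  rw [h2, List.take_of_length_le (by simp)]

-- ===== VERDICT (by name: the statement is the Claim_ definition above) =====
theorem solution_spec : Claim_equal_solution := by
  unfold Claim_equal_solution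
  intro A B _
  unfold Spec_solution solution solution_alt
  by_cases hAB : A = B
  · rw [if_pos hAB, if_neg (by rw [hAB]; simp), if_pos hAB]
  · rw [if_neg hAB]
    have hab : A.toList ≠ B.toList := fun h => hAB (String.toList_inj.mp h)
    by_cases hlen : B.toList.length = A.toList.length
    · -- equal lengths
      rw [if_neg (by simp only [PySem.Str.len_eq]; omega), if_neg hAB]
      have hn : 0 < A.toList.length := by
        rcases Nat.eq_zero_or_pos A.toList.length with h0 | h0
        · exact absurd (List.length_eq_zero_iff.mp h0 ▸
            List.length_eq_zero_iff.mp (by omega : B.toList.length = 0) ▸ rfl) hab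
        · exact h0
      rw [rfindFrom_eval A.toList B.toList hn]
      have htop : A.toList.length + A.toList.length - 1 = (A.toList.length - 1) + A.toList.length := by
        omega
      rw [htop, go_top A.toList B.toList hlen hn A.toList.length]
      by_cases h2 : 2 ≤ A.toList.length
      · -- n ≥ 2: relate the two loops
        rw [go_at_top A.toList B.toList hab hlen h2]
        have hmain := main_loop A.toList B.toList hlen h2 (A.toList.length - 2) (le_refl _)
        have hone : ((A.toList.length : Int) - 1 - (A.toList.length - 2 : Nat)) = 1 := by
          omega
        rw [hone] at hmain
        rw [PySem.Str.len_eq, hmain]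
        set g := PySem.Chars.rfind.go ((A.toList ++ A.toList).drop 1) B.toList
          (A.toList.length - 2) with hg
        by_cases hgneg : g = -1
        · rw [if_pos hgneg, if_pos hgneg, if_neg (by simp)]
        · have hge : 0 ≤ g := go_ne_neg_one_nonneg _ _ _ hgneg
          rw [if_neg hgneg, if_neg hgneg, if_pos (by omega)]
          omega
      · -- n = 1: the range is empty and the scan finds nothing
        have hn1 : A.toList.length = 1 := by omega
        have hd : (A.toList ++ A.toList).drop 1 = A.toList := by
          rw [List.drop_append_of_le_length (by omega), List.drop_of_length_le (by omega)]
          simp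
        have hgo : PySem.Chars.rfind.go ((A.toList ++ A.toList).drop 1) B.toList (A.toList.length - 1) = -1 := by
          rw [hn1, go_zero, hd, if_neg ?_]
          rw [List.isPrefixOf_iff_prefix]
          intro hpre
          exact hab (hpre.eq_of_length (by omega)).symm
        rw [hgo, if_pos rfl, if_neg (by simp)]
        rw [PySem.Str.len_eq, hn1]
        have : PySem.List.pyRange (1:Int) ((1:Nat):Int) = [] := by
          norm_num [PySem.List.pyRange]
        rw [this]
        rfl
    · -- length mismatch: A side loops over all rotations (all have length |A|), B side exits
      rw [if_pos (by simp only [PySem.Str.len_eq]; omega)]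
      rw [PySem.Str.len_eq]
      exact loop_len_mismatch A.toList B.toList hlen _
        (fun i hi => (PySem.List.mem_pyRange_one.mp hi))
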